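-- pv_equiv track=rewrite | github.com/alexmarroig/Besthingstodo | life-discovery/services/discovery-engine/app/normalize.py | cultural_profile
-- ===== SOURCE A (Python) =====
-- def cultural_profile(tags: list[str]) -> list[str]:
--     tags_low = [x.lower() for x in tags]
--     profile = ["cultural"]
--     if any(x in tags_low for x in ["quiet", "contemplative", "museum"]):
--         profile.append("calm")
--     if any(x in tags_low for x in ["debate", "philosophy", "cinema"]):
--         profile.append("intellectual")
--     return profile
-- ===== SOURCE B (Python) =====
-- def cultural_profile(tags: list[str]) -> list[str]:
--     calm = False
--     intellectual = False
--     for tag in tags: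
--         t = tag.lower()
--         if t in {"quiet", "contemplative", "museum"}:
--             calm = True
--         if t in {"debate", "philosophy", "cinema"}:
--             intellectual = True
--     profile = ["cultural"]
--     if calm:
--         profile.append("calm")
--     if intellectual:
--         profile.append("intellectual")
--     return profile
-- ===== Notes on version B (the rewrite author's own statement) =====
-- stated objective: idiomatic
-- what changed: Replaces the lowercased-copy list plus two any-scans over keyword lists with a single pass over the tags that lowercases each tag once and accumulates two boolean flags, then builds the profile from the flags.
import Mathlib
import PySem

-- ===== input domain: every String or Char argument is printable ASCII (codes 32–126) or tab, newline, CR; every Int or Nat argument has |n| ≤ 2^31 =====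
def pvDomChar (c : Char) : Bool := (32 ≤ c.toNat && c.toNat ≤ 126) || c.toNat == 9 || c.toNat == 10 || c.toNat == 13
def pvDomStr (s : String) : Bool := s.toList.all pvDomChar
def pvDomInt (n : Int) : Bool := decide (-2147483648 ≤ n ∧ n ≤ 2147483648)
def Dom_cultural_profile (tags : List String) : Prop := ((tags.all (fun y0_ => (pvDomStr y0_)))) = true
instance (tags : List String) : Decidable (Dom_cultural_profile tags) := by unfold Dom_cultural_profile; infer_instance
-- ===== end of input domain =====

-- B replaces the lowercased-copy plus two any-scans with one pass over the tags accumulating two flags (idiomatic).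


-- ===== PORT A =====
def cultural_profile (tags : List String) : List String :=
  let tags_low := tags.map PySem.Str.lower
  let profile := ["cultural"]
  let profile := if (["quiet", "contemplative", "museum"].any fun x => tags_low.contains x)
                 then profile ++ ["calm"] else profile
  let profile := if (["debate", "philosophy", "cinema"].any fun x => tags_low.contains x)
                 then profile ++ ["intellectual"] else profile
  profile

-- ===== PORT B =====
def cultural_step (st : Bool × Bool) (tag : String) : Bool × Bool :=
  let t := PySem.Str.lower tag
  (st.1 || ["quiet", "contemplative", "museum"].contains t,
   st.2 || ["debate", "philosophy", "cinema"].contains t)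

def cultural_profile_alt (tags : List String) : List String :=
  let flags := tags.foldl cultural_step (false, false)
  let profile := ["cultural"]
  let profile := if flags.1 then profile ++ ["calm"] else profile
  let profile := if flags.2 then profile ++ ["intellectual"] else profile
  profile

-- ===== PRECONDITION & SPEC =====
def Spec_cultural_profile (tags : List String) (out : List String) : Prop := out = cultural_profile_alt tags
instance (tags : List String) (out : List String) : Decidable (Spec_cultural_profile tags out) := by unfold Spec_cultural_profile; infer_instance

-- ===== CLAIM (what is proved, stated in full; the proofs are below) =====
def Claim_equal_cultural_profile : Prop := ∀ (tags : List String), Dom_cultural_profile tags → Spec_cultural_profile tags (cultural_profile tags)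

-- ===== LEMMAS AND PROOFS =====

-- The one-pass fold computes, for each keyword list, whether some tag lowers into it.
theorem cultural_fold_flags (tags : List String) (b1 b2 : Bool) :
    tags.foldl cultural_step (b1, b2)
    = (b1 || tags.any (fun tag => ["quiet", "contemplative", "museum"].contains (PySem.Str.lower tag)),
       b2 || tags.any (fun tag => ["debate", "philosophy", "cinema"].contains (PySem.Str.lower tag))) := by
  induction tags generalizing b1 b2 with
  | nil => simp
  | cons h t ih =>
    rw [List.foldl_cons]
    show List.foldl cultural_step
      (b1 || ["quiet", "contemplative", "museum"].contains (PySem.Str.lower h),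
       b2 || ["debate", "philosophy", "cinema"].contains (PySem.Str.lower h)) t = _
    rw [ih]
    simp [Bool.or_assoc]

-- Scanning the keywords against the lowered tags equals scanning the tags against the keywords.
theorem cultural_any_swap (K tags : List String) :
    (K.any fun x => (tags.map PySem.Str.lower).contains x)
    = (tags.any fun tag => K.contains (PySem.Str.lower tag)) := by
  rw [Bool.eq_iff_iff]
  simp only [List.any_eq_true, List.contains_iff_mem, List.mem_map]
  constructor
  · rintro ⟨x, hx, t, ht, rfl⟩; exact ⟨t, ht, hx⟩
  · rintro ⟨t, ht, hK⟩; exact ⟨_, hK, t, ht, rfl⟩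

-- ===== VERDICT (by name: the statement is the Claim_ definition above) =====
theorem cultural_profile_spec : Claim_equal_cultural_profile := by
  intro tags _
  show cultural_profile tags = cultural_profile_alt tags
  simp only [cultural_profile, cultural_profile_alt, cultural_fold_flags, cultural_any_swap,
    Bool.false_or]
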